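-- pv_equiv track=rewrite | github.com/unparalleled-js/in3cli | src/in3cli/util.py | find_format_width
-- ===== SOURCE A (Python) =====
-- from collections import OrderedDict
--
-- def find_format_width(record, header, include_header=True):
--     """Fetches needed keys/items to be displayed based on header keys.
--
--     Finds the largest string against each column so as to decide the padding size for the column.
--
--     Args:
--         record (dict): data to be formatted.
--         header (dict): key-value where keys should map to keys of record dict and
--           value is the corresponding column name to be displayed on the CLI.
--         include_header (bool): include header in output, defaults to True.
--
--     Returns:
--         tuple (list of dict, dict): i.e Filtered records, padding size of columns.
--     """
--     rows = []
--     if include_header: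
--         if not header:
--             header = _get_default_header(record)
--         rows.append(header)
--     # noinspection PyTypeChecker
--     max_width_item = dict(header.items())  # Copy
--     for record_row in record:
--         row = OrderedDict()
--         for header_key in header.keys():
--             item = record_row.get(header_key)
--             row[header_key] = item
--             max_width_item[header_key] = max(max_width_item[header_key], str(item), key=len)
--         rows.append(row)
--     column_size = {key: len(value) for key, value in max_width_item.items()}
--     return rows, column_size
--
-- def _get_default_header(header_items):
--     if not header_items:
--         return
--
--     # Creates dict where keys and values are the same for `find_format_width()`.
--     header = {}
--     for item in header_items:
--         keys = item.keys()
--         for key in keys: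
--             if key not in header and isinstance(key, str):
--                 header[key] = key
--     return header
-- ===== SOURCE B (Python) =====
-- from collections import OrderedDict
--
--
-- def find_format_width(record, header, include_header=True):
--     """Two-pass re-implementation: build the filtered rows row-by-row, then
--     compute the padding widths column-major, one header key at a time."""
--     if include_header and not header:
--         # dict comprehension keeps the first-occurrence order of keys
--         header = {k: k for row in record for k in row}
--     keys = list(header.keys())
--     body = [OrderedDict((k, row.get(k)) for k in keys) for row in record]
--     rows = ([header] + body) if include_header else body
--     column_size = {
--         k: max(len(header[k]),
--                max((len(str(row.get(k))) for row in record), default=0))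
--         for k in keys
--     }
--     return rows, column_size
-- ===== Notes on version B (the rewrite author's own statement) =====
-- stated objective: simpler
-- what changed: A builds rows and column widths in one interleaved row-major loop mutating a running max-width dict; B makes two independent passes: a comprehension building the filtered rows, then a column-major pass computing each column width as max(len(header value), max of cell lengths).
-- outside the precondition, e.g. on find_format_width([], {}, True): A raises AttributeError, B returns ([{}], {})
import Mathlib
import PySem

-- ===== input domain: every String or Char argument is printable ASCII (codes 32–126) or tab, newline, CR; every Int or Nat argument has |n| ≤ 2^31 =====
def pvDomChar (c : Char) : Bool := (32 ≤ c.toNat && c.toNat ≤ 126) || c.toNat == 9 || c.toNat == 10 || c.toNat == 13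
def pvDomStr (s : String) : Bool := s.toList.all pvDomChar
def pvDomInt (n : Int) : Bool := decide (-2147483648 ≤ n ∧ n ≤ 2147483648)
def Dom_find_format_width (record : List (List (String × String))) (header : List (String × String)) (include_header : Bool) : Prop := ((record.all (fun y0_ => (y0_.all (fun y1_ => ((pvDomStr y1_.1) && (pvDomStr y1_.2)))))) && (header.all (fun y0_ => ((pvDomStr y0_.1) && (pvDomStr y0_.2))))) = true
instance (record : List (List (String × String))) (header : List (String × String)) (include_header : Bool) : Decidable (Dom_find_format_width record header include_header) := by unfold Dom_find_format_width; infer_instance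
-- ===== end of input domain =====

-- B builds the filtered rows and the column widths in two independent passes (rows by a map,
-- widths column-major per header key) instead of A's single interleaved row-major loop.

-- ===== PORT A =====
-- Python's max(cur, str(item), key=len): the second argument wins only when strictly longer
def ffwMax (cur item : String) : String :=
  if PySem.Str.len item > PySem.Str.len cur then item else cur

-- _get_default_header; for record = [] Python returns None (the caller then raises
-- AttributeError — those inputs are outside Pre_), here that case yields [].
def ffwDefaultHeader (record : List (List (String × String))) : List (String × String) :=
  (record.foldl
    (fun (h : PySem.Dict String String) item =>
      item.foldl (fun h kv => if h.contains kv.1 then h else h.insert kv.1 kv.1) h)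
    PySem.Dict.empty).items

def find_format_width (record : List (List (String × String))) (header : List (String × String)) (include_header : Bool) : (List (List (String × String))) × (List (String × Int)) :=
  let header := if include_header then (if header = [] then ffwDefaultHeader record else header) else header
  let rows0 : List (List (String × String)) := if include_header then [header] else []
  let st := record.foldl
    (fun (st : List (List (String × String)) × PySem.Dict String String) record_row =>
      let inner := ((PySem.Dict.mk header).keys).foldl
        (fun (st2 : PySem.Dict String String × PySem.Dict String String) header_key =>
          -- record_row.get(header_key): present under Pre_ (Python's None has no String counterpart)
          let item := (PySem.Dict.mk record_row).getD header_key ""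
          (st2.1.insert header_key item,
           st2.2.insert header_key (ffwMax (st2.2.getD header_key "") item)))
        (PySem.Dict.empty, st.2)
      (st.1 ++ [inner.1.items], inner.2))
    (rows0, PySem.Dict.mk header)
  (st.1, st.2.items.map (fun kv => (kv.1, PySem.Str.len kv.2)))

-- ===== PORT B =====
-- Source B's default header {k: k for row in record for k in row}
def ffwAltDefault (record : List (List (String × String))) : List (String × String) :=
  (record.foldl
    (fun (d : PySem.Dict String String) row =>
      row.foldl (fun d kv => d.insert kv.1 kv.1) d)
    PySem.Dict.empty).items

def find_format_width_alt (record : List (List (String × String))) (header : List (String × String)) (include_header : Bool) : (List (List (String × String))) × (List (String × Int)) :=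
  let header := if include_header && header.isEmpty then ffwAltDefault record else header
  let keys := header.map Prod.fst
  let body := record.map (fun row => keys.map (fun k => (k, (PySem.Dict.mk row).getD k "")))
  let rows := if include_header then header :: body else body
  -- max(…, default=0) over cell lengths ported as foldl max 0 (exact: lengths are ≥ 0)
  let column_size := keys.map (fun k =>
    (k, max (PySem.Str.len ((PySem.Dict.mk header).getD k ""))
            (record.foldl (fun m row => max m (PySem.Str.len ((PySem.Dict.mk row).getD k ""))) 0)))
  (rows, column_size)

-- ===== PRECONDITION & SPEC =====
-- Pre_ excludes: (a) record = [] with an empty header and include_header, where A raises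
-- AttributeError; (b) inputs where some record row lacks an (effective) header key, where A's
-- rows contain Python's None, which is not a value of the declared String type; (c) duplicate
-- keys inside header or inside a record row, which the Python dict arguments cannot carry.
def Pre_find_format_width (record : List (List (String × String))) (header : List (String × String)) (include_header : Bool) : Prop :=
  (header.map Prod.fst).Nodup ∧
  (∀ r ∈ record, (r.map Prod.fst).Nodup) ∧
  (if include_header && header.isEmpty then
     record ≠ [] ∧ ∀ r ∈ record, ∀ r' ∈ record, ∀ kv ∈ r', kv.1 ∈ r.map Prod.fst
   else
     ∀ r ∈ record, ∀ kv ∈ header, kv.1 ∈ r.map Prod.fst)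
instance (record : List (List (String × String))) (header : List (String × String)) (include_header : Bool) : Decidable (Pre_find_format_width record header include_header) := by unfold Pre_find_format_width; infer_instance

def pvWitness_find_format_width : (List (List (String × String))) × (List (String × String)) × Bool :=
  ([[("a", "x")]], [("a", "A")], true)

def Spec_find_format_width (record : List (List (String × String))) (header : List (String × String)) (include_header : Bool) (out : (List (List (String × String))) × (List (String × Int))) : Prop := out = find_format_width_alt record header include_header
instance (record : List (List (String × String))) (header : List (String × String)) (include_header : Bool) (out : (List (List (String × String))) × (List (String × Int))) : Decidable (Spec_find_format_width record header include_header out) := by unfold Spec_find_format_width; infer_instance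

-- ===== CLAIM (what is proved, stated in full; the proofs are below) =====
def Claim_equal_find_format_width : Prop := ∀ (record : List (List (String × String))) (header : List (String × String)) (include_header : Bool), Dom_find_format_width record header include_header → Pre_find_format_width record header include_header → Spec_find_format_width record header include_header (find_format_width record header include_header)
-- ===== LEMMAS AND PROOFS =====

-- record_row.get(k) as both ports spell it
def ffwVal (row : List (String × String)) (k : String) : String := (PySem.Dict.mk row).getD k ""

lemma ffw_len_max (a b : String) : PySem.Str.len (ffwMax a b) = max (PySem.Str.len a) (PySem.Str.len b) := by
  unfold ffwMax; split_ifs with h <;> omega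

lemma ffw_len_nonneg (s : String) : 0 ≤ PySem.Str.len s := by
  rw [PySem.Str.len_eq]; positivity

-- length of a max-by-len fold is the fold of the lengths
lemma ffw_len_foldl {α : Type} (l : List α) (g : α → String) (a : String) :
    PySem.Str.len (l.foldl (fun c x => ffwMax c (g x)) a)
      = l.foldl (fun m x => max m (PySem.Str.len (g x))) (PySem.Str.len a) := by
  induction l generalizing a with
  | nil => rfl
  | cons x l ih => simp only [List.foldl_cons, ih, ffw_len_max]

lemma ffw_max_shift {α : Type} (l : List α) (g : α → Int) (a b : Int) :
    l.foldl (fun m x => max m (g x)) (max a b) = max a (l.foldl (fun m x => max m (g x)) b) := by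
  induction l generalizing b with
  | nil => rfl
  | cons x l ih => simp only [List.foldl_cons, max_assoc, ih]

-- a value-equals-key dict absorbs the guarded insert: d.insert k k = d when k is present
lemma ffw_insert_id (d : PySem.Dict String String) (k : String)
    (hinv : ∀ p ∈ d.items, p.2 = p.1) (hc : d.contains k = true) : d.insert k k = d := by
  apply PySem.Dict.ext
  rw [PySem.Dict.items_insert_of_contains d k hc]
  conv_rhs => rw [← List.map_id d.items]
  apply List.map_congr_left
  intro p hp
  by_cases h : p.1 = k
  · have h2 := hinv p hp
    have : p = (k, k) := by
      obtain ⟨p1, p2⟩ := p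
      simp_all
    simp [this]
  · simp [h]

-- one row of A's default-header loop = one row of B's (and keeps values equal to keys)
lemma ffw_row_def (row : List (String × String)) :
    ∀ (d : PySem.Dict String String), (∀ p ∈ d.items, p.2 = p.1) →
      row.foldl (fun h kv => if h.contains kv.1 then h else h.insert kv.1 kv.1) d
        = row.foldl (fun h kv => h.insert kv.1 kv.1) d
      ∧ (∀ p ∈ (row.foldl (fun h kv => h.insert kv.1 kv.1) d).items, p.2 = p.1) := by
  induction row with
  | nil => intro d hinv; exact ⟨rfl, hinv⟩
  | cons kv row ih =>
    intro d hinv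
    simp only [List.foldl_cons]
    have hinv' : ∀ p ∈ (d.insert kv.1 kv.1).items, p.2 = p.1 := by
      intro p hp
      rcases (PySem.Dict.mem_items_insert d kv.1 kv.1 p).1 hp with h | h
      · simp [h]
      · exact hinv p h.1
    by_cases hc : d.contains kv.1 = true
    · rw [if_pos hc, ffw_insert_id d kv.1 hinv hc]
      exact ih d hinv
    · rw [if_neg hc]
      exact ih (d.insert kv.1 kv.1) hinv'

lemma ffw_default_fold (record : List (List (String × String))) :
    ∀ (d : PySem.Dict String String), (∀ p ∈ d.items, p.2 = p.1) →
      record.foldl (fun h item => item.foldl (fun h kv => if h.contains kv.1 then h else h.insert kv.1 kv.1) h) d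
        = record.foldl (fun d row => row.foldl (fun d kv => d.insert kv.1 kv.1) d) d := by
  induction record with
  | nil => intro d hinv; rfl
  | cons row record ih =>
    intro d hinv
    simp only [List.foldl_cons]
    obtain ⟨he, hi⟩ := ffw_row_def row d hinv
    rw [he]
    exact ih _ hi

-- the two default-header builders agree (A guards the insert, B overwrites with the same pair)
lemma ffw_default_eq (record : List (List (String × String))) :
    ffwDefaultHeader record = ffwAltDefault record := by
  unfold ffwDefaultHeader ffwAltDefault
  rw [ffw_default_fold record PySem.Dict.empty (by intro p hp; simp [PySem.Dict.empty] at hp)]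

lemma ffw_default_nodup (record : List (List (String × String))) :
    ((ffwAltDefault record).map Prod.fst).Nodup := by
  unfold ffwAltDefault
  have h : ∀ (d : PySem.Dict String String), d.keys.Nodup →
      (record.foldl (fun d row => row.foldl (fun d kv => d.insert kv.1 kv.1) d) d).keys.Nodup := by
    induction record with
    | nil => intro d hd; exact hd
    | cons row record ih =>
      intro d hd
      simp only [List.foldl_cons]
      exact ih _ (PySem.Dict.nodup_keys_foldl_insert_key row Prod.fst (fun d kv => kv.1) d hd)
  exact h PySem.Dict.empty (by simp [PySem.Dict.empty, PySem.Dict.keys])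

-- getD through one header pass of inserts
lemma ffw_upd_getD_not_mem (f : String → String → String) (K : List String) (m : PySem.Dict String String)
    (j : String) (hj : j ∉ K) :
    (K.foldl (fun m k => m.insert k (f k (m.getD k ""))) m).getD j "" = m.getD j "" := by
  induction K generalizing m with
  | nil => rfl
  | cons k K ih =>
    simp only [List.foldl_cons]
    rw [ih _ (by simp at hj; exact hj.2),
        PySem.Dict.getD_insert_of_ne m _ _ (by simp at hj; exact hj.1)]

lemma ffw_upd_getD_mem (f : String → String → String) (K : List String) (hnd : K.Nodup)
    (m : PySem.Dict String String) (j : String) (hj : j ∈ K) :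
    (K.foldl (fun m k => m.insert k (f k (m.getD k ""))) m).getD j "" = f j (m.getD j "") := by
  induction K generalizing m with
  | nil => simp at hj
  | cons k K ih =>
    simp only [List.foldl_cons]
    rcases List.mem_cons.1 hj with h | h
    · subst h
      rw [ffw_upd_getD_not_mem f K _ j (by simp at hnd; exact hnd.1),
          PySem.Dict.getD_insert_self]
    · have hnd1 : k ∉ K := by simp at hnd; exact hnd.1
      have hne : j ≠ k := fun hjk => hnd1 (hjk ▸ h)
      have hnd2 : K.Nodup := by simp at hnd; exact hnd.2
      rw [ih hnd2 _ h,
          PySem.Dict.getD_insert_of_ne m _ _ hne]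

lemma ffw_upd_keys (f : String → String → String) (K : List String) (m : PySem.Dict String String)
    (hsub : ∀ k ∈ K, k ∈ m.keys) :
    (K.foldl (fun m k => m.insert k (f k (m.getD k ""))) m).keys = m.keys := by
  rw [PySem.Dict.keys_foldl_insert K (fun d x => f x (d.getD x "")) m,
      PySem.Set.update_eq_append_filter]
  have : (PySem.Set.ofList K).filter (fun y => !(PySem.Set.contains m.keys y)) = [] := by
    apply List.filter_eq_nil_iff.2
    intro y hy
    have : y ∈ K := by
      have := PySem.Set.mem_ofList (xs := K) (y := y)
      exact this.1 hy
    simp [PySem.Set.contains] at *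
    exact hsub y ‹y ∈ K›
  rw [this, List.append_nil]

lemma ffw_mw_fold_keys (K : List String) (record : List (List (String × String))) :
    ∀ (m : PySem.Dict String String), m.keys = K →
    (record.foldl (fun m row => K.foldl (fun m k => m.insert k (ffwMax (m.getD k "") (ffwVal row k))) m) m).keys = K := by
  induction record with
  | nil => intro m hk; exact hk
  | cons row record ih =>
    intro m hk
    simp only [List.foldl_cons]
    apply ih
    rw [ffw_upd_keys (fun k cur => ffwMax cur (ffwVal row k)) K m (by rw [hk]; intro k h; exact h)]
    exact hk

-- the width dict through the whole record loop, per key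
lemma ffw_mw_fold (K : List String) (hnd : K.Nodup) (record : List (List (String × String))) :
    ∀ (m : PySem.Dict String String), m.keys = K → ∀ j ∈ K,
      (record.foldl (fun m row => K.foldl (fun m k => m.insert k (ffwMax (m.getD k "") (ffwVal row k))) m) m).getD j ""
        = record.foldl (fun c row => ffwMax c (ffwVal row j)) (m.getD j "") := by
  induction record with
  | nil => intro m hk j hj; rfl
  | cons row record ih =>
    intro m hk j hj
    simp only [List.foldl_cons]
    have hk' : (K.foldl (fun m k => m.insert k (ffwMax (m.getD k "") (ffwVal row k))) m).keys = K := by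
      rw [ffw_upd_keys (fun k cur => ffwMax cur (ffwVal row k)) K m (by rw [hk]; intro k h; exact h)]
      exact hk
    rw [ih _ hk' j hj,
        ffw_upd_getD_mem (fun k cur => ffwMax cur (ffwVal row k)) K hnd m j hj]

-- one record row builds exactly the mapped row
lemma ffw_row_items (K : List String) (hnd : K.Nodup) (row : List (String × String)) :
    (K.foldl (fun d k => d.insert k (ffwVal row k)) PySem.Dict.empty).items
      = K.map (fun k => (k, ffwVal row k)) := by
  rw [PySem.Dict.items_foldl_insert_fresh K (fun a => a) (fun a => ffwVal row a) PySem.Dict.empty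
        (by intro a _; simp [PySem.Dict.contains_empty]) (by simpa using hnd)]
  simp [PySem.Dict.empty]

-- the whole body of A, for an already-resolved header H, equals B's two passes
lemma ffw_core (record : List (List (String × String))) (H : List (String × String))
    (rows0 : List (List (String × String))) (hnd : (H.map Prod.fst).Nodup) :
    (let st := record.foldl
        (fun (st : List (List (String × String)) × PySem.Dict String String) record_row =>
          let inner := ((PySem.Dict.mk H).keys).foldl
            (fun (st2 : PySem.Dict String String × PySem.Dict String String) header_key =>
              let item := (PySem.Dict.mk record_row).getD header_key ""
              (st2.1.insert header_key item,
               st2.2.insert header_key (ffwMax (st2.2.getD header_key "") item)))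
            (PySem.Dict.empty, st.2)
          (st.1 ++ [inner.1.items], inner.2))
        (rows0, PySem.Dict.mk H)
     (st.1, st.2.items.map (fun kv => (kv.1, PySem.Str.len kv.2))))
    = (rows0 ++ record.map (fun row => (H.map Prod.fst).map (fun k => (k, (PySem.Dict.mk row).getD k ""))),
       (H.map Prod.fst).map (fun k =>
         (k, max (PySem.Str.len ((PySem.Dict.mk H).getD k ""))
                 (record.foldl (fun m row => max m (PySem.Str.len ((PySem.Dict.mk row).getD k ""))) 0)))) := by
  have hK : (PySem.Dict.mk H).keys = H.map Prod.fst := rfl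
  have hstep : (fun (st : List (List (String × String)) × PySem.Dict String String) record_row =>
          let inner := ((PySem.Dict.mk H).keys).foldl
            (fun (st2 : PySem.Dict String String × PySem.Dict String String) header_key =>
              let item := (PySem.Dict.mk record_row).getD header_key ""
              (st2.1.insert header_key item,
               st2.2.insert header_key (ffwMax (st2.2.getD header_key "") item)))
            (PySem.Dict.empty, st.2)
          (st.1 ++ [inner.1.items], inner.2))
      = (fun st record_row =>
          (st.1 ++ [(H.map Prod.fst).map (fun k => (k, ffwVal record_row k))],
           (H.map Prod.fst).foldl (fun m k => m.insert k (ffwMax (m.getD k "") (ffwVal record_row k))) st.2)) := by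
    funext st record_row
    show (st.1 ++ [((((PySem.Dict.mk H).keys).foldl
            (fun (st2 : PySem.Dict String String × PySem.Dict String String) header_key =>
              (st2.1.insert header_key (ffwVal record_row header_key),
               st2.2.insert header_key (ffwMax (st2.2.getD header_key "") (ffwVal record_row header_key))))
            (PySem.Dict.empty, st.2)).1).items],
           (((PySem.Dict.mk H).keys).foldl
            (fun (st2 : PySem.Dict String String × PySem.Dict String String) header_key =>
              (st2.1.insert header_key (ffwVal record_row header_key),
               st2.2.insert header_key (ffwMax (st2.2.getD header_key "") (ffwVal record_row header_key))))
            (PySem.Dict.empty, st.2)).2) = _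
    rw [PySem.List.foldl_prod_mk
          (f := fun (d : PySem.Dict String String) hk => d.insert hk (ffwVal record_row hk))
          (g := fun (m : PySem.Dict String String) hk => m.insert hk (ffwMax (m.getD hk "") (ffwVal record_row hk)))]
    rw [hK, ffw_row_items (H.map Prod.fst) hnd record_row]
  rw [hstep, PySem.List.foldl_prod_mk
        (f := fun (acc : List (List (String × String))) row => acc ++ [(H.map Prod.fst).map (fun k => (k, ffwVal row k))])
        (g := fun (m : PySem.Dict String String) row => (H.map Prod.fst).foldl (fun m k => m.insert k (ffwMax (m.getD k "") (ffwVal row k))) m)]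
  rw [PySem.List.foldl_append_singleton_eq_map]
  refine Prod.ext ?_ ?_
  · simp [ffwVal]
  · show (record.foldl (fun m row => (H.map Prod.fst).foldl (fun m k => m.insert k (ffwMax (m.getD k "") (ffwVal row k))) m) (PySem.Dict.mk H)).items.map (fun kv => (kv.1, PySem.Str.len kv.2)) = _
    have hfk := ffw_mw_fold_keys (H.map Prod.fst) record (PySem.Dict.mk H) hK
    rw [PySem.Dict.items_eq_map_keys _ (by rw [hfk]; exact hnd) "", hfk, List.map_map]
    apply List.map_congr_left
    intro k hk
    simp only [Function.comp]
    rw [ffw_mw_fold (H.map Prod.fst) hnd record (PySem.Dict.mk H) hK k hk]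
    rw [ffw_len_foldl record (fun row => ffwVal row k) ((PySem.Dict.mk H).getD k "")]
    have h0 : PySem.Str.len ((PySem.Dict.mk H).getD k "") = max (PySem.Str.len ((PySem.Dict.mk H).getD k "")) 0 :=
      (max_eq_left (ffw_len_nonneg _)).symm
    rw [h0, ffw_max_shift]
    simp [ffwVal]

-- ===== VERDICT (by name: the statement is the Claim_ definition above) =====
theorem find_format_width_spec : Claim_equal_find_format_width := by
  intro record header include_header _ hpre
  obtain ⟨h1, _, h3⟩ := hpre
  unfold Spec_find_format_width find_format_width find_format_width_alt
  cases include_header with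
  | false =>
    simp only [Bool.false_and, if_false, Bool.false_eq_true]
    have := ffw_core record header [] h1
    simp only [] at this
    rw [this]
    simp
  | true =>
    by_cases hh : header = []
    · subst hh
      simp only [Bool.true_and, List.isEmpty_nil, if_true]
      rw [ffw_default_eq record]
      have := ffw_core record (ffwAltDefault record) [ffwAltDefault record] (ffw_default_nodup record)
      simp only [] at this
      rw [this]
      simp
    · have hne : header.isEmpty = false := by
        cases header with
        | nil => exact absurd rfl hh
        | cons a l => rfl
      simp only [Bool.true_and, hne, if_neg hh, Bool.false_eq_true, if_false, if_true]
      have := ffw_core record header [header] h1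
      simp only [] at this
      rw [this]
      simp
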